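-- pv_equiv track=rewrite | github.com/dx3n/Terminal | terminal/terminal.py | numbers_in_string
-- ===== SOURCE A (Python) =====
-- def numbers_in_string(string):
--         string = string.lower()
--         alphabet = 'abcdefghijklmnopqrstuvwxyz'
--         numbers = '1234567890'
--         for i in range(len(alphabet)):
--             if alphabet[i] in string:
--                 return False
--         for i in numbers:
--             if i in string:
--                 return True
--         return False
-- ===== SOURCE B (Python) =====
-- def numbers_in_string(string):
--     has_digit = False
--     for ch in string.lower():
--         if ch in 'abcdefghijklmnopqrstuvwxyz':
--             return False
--         if ch in '1234567890':
--             has_digit = True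
--     return has_digit
-- ===== Notes on version B (the rewrite author's own statement) =====
-- stated objective: idiomatic
-- what changed: B makes a single left-to-right pass over the lowered string with a has_digit flag instead of A's 36 separate substring scans (one per letter and digit).
import Mathlib
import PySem

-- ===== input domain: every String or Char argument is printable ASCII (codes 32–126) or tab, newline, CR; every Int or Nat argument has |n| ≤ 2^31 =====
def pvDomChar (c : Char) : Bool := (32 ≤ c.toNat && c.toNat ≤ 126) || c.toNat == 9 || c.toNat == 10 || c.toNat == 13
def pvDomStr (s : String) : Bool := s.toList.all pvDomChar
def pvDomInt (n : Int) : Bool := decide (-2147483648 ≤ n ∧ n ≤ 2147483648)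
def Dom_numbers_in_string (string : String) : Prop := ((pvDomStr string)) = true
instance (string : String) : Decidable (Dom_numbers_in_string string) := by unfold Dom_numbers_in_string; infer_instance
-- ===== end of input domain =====

-- B replaces A's 36 separate per-character substring scans with a single left-to-right
-- pass over the lowered string keeping a has_digit flag (objective: idiomatic one-pass scan).

-- ===== PORT A =====
-- A lowercases the input, then for each of the 26 letters tests 'letter in string'
-- (returning False on the first hit), then for each of the 10 digits tests 'digit in string'
-- (returning True on the first hit), else returns False. 'c in string' for a single
-- character is PySem.Chars.isIn [c].
def numbers_in_string (string : String) : Bool :=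
  let s := PySem.Chars.lower string.toList
  if "abcdefghijklmnopqrstuvwxyz".toList.any (fun c => PySem.Chars.isIn [c] s) then
    false
  else if "1234567890".toList.any (fun c => PySem.Chars.isIn [c] s) then
    true
  else
    false

-- ===== PORT B =====
-- B's loop: early-return false on a letter, set the flag on a digit, else keep scanning.
def pvAltLoop : List Char → Bool → Bool
  | [], hasDigit => hasDigit
  | c :: rest, hasDigit =>
    if "abcdefghijklmnopqrstuvwxyz".toList.contains c then false
    else if "1234567890".toList.contains c then pvAltLoop rest true
    else pvAltLoop rest hasDigit

def numbers_in_string_alt (string : String) : Bool :=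
  pvAltLoop (PySem.Chars.lower string.toList) false

-- ===== PRECONDITION & SPEC =====
def Spec_numbers_in_string (string : String) (out : Bool) : Prop := out = numbers_in_string_alt string
instance (string : String) (out : Bool) : Decidable (Spec_numbers_in_string string out) := by unfold Spec_numbers_in_string; infer_instance

-- ===== CLAIM (what is proved, stated in full; the proofs are below) =====
def Claim_equal_numbers_in_string : Prop := ∀ (string : String), Dom_numbers_in_string string → Spec_numbers_in_string string (numbers_in_string string)

-- ===== LEMMAS AND PROOFS =====

-- B's loop computes: false if some letter occurs, else hasDigit || some digit occurs.
lemma pvAltLoop_eq (l : List Char) (hd : Bool) :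
    pvAltLoop l hd =
      if l.any (fun c => "abcdefghijklmnopqrstuvwxyz".toList.contains c) then false
      else (hd || l.any (fun c => "1234567890".toList.contains c)) := by
  induction l generalizing hd with
  | nil => simp [pvAltLoop]
  | cons c rest ih =>
    simp only [pvAltLoop, List.any_cons]
    generalize "abcdefghijklmnopqrstuvwxyz".toList = A at ih ⊢
    generalize "1234567890".toList = D at ih ⊢
    by_cases hL : c ∈ A
    · simp [hL]
    · by_cases hD : c ∈ D
      · simp [hL, hD, ih]
      · simp [hL, hD, ih]


-- 'any needle occurs in l' stated from the needles' side equals it stated from l's side.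
lemma pvAny_comm (needles l : List Char) :
    needles.any (fun c => PySem.Chars.isIn [c] l) = l.any (fun c => needles.contains c) := by
  apply Bool.eq_iff_iff.mpr
  simp only [List.any_eq_true, PySem.Chars.isIn_iff_infix, List.singleton_infix_iff,
    List.contains_eq_mem, decide_eq_true_eq]
  tauto

-- ===== VERDICT (by name: the statement is the Claim_ definition above) =====
theorem numbers_in_string_spec : Claim_equal_numbers_in_string := by
  intro s _
  unfold Spec_numbers_in_string
  simp only [numbers_in_string, numbers_in_string_alt, pvAltLoop_eq, pvAny_comm]
  split_ifs <;> simp_all
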